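-- pv_equiv track=rewrite | github.com/ONS-OpenData/cmd-databaker-utils | databakerUtils/sparsityFunctions.py | FindAllCombinations
-- ===== SOURCE A (Python) =====
-- def FindAllCombinations(uniqueListOfCodesInColumns):
--     '''
--     finds and returns all possible combinations
--     each combination is a string, separated by a '^'
--     '''
--     if len(uniqueListOfCodesInColumns) == 3:
--         allCombos = []  #list of all combinations
--         for first in uniqueListOfCodesInColumns[0]:
--             for second in uniqueListOfCodesInColumns[1]:
--                 for third in uniqueListOfCodesInColumns[2]:
--                     allCombos.append(first + '^' + second + '^' + third)
--
--     elif len(uniqueListOfCodesInColumns) == 4: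
--         allCombos = []  #list of all combinations
--         for first in uniqueListOfCodesInColumns[0]:
--             for second in uniqueListOfCodesInColumns[1]:
--                 for third in uniqueListOfCodesInColumns[2]:
--                     for forth in uniqueListOfCodesInColumns[3]:
--                         allCombos.append(first + '^' + second + '^' + third + '^' +forth)
--
--     elif len(uniqueListOfCodesInColumns) == 5:
--         allCombos = []  #list of all combinations
--         for first in uniqueListOfCodesInColumns[0]:
--             for second in uniqueListOfCodesInColumns[1]:
--                 for third in uniqueListOfCodesInColumns[2]:
--                     for forth in uniqueListOfCodesInColumns[3]:
--                         for fith in uniqueListOfCodesInColumns[4]: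
--                             allCombos.append(first + '^' + second + '^' + third + '^' +\
--                                           forth + '^' + fith)
--
--     elif len(uniqueListOfCodesInColumns) == 6:
--         allCombos = []  #list of all combinations
--         for first in uniqueListOfCodesInColumns[0]:
--             for second in uniqueListOfCodesInColumns[1]:
--                 for third in uniqueListOfCodesInColumns[2]:
--                     for forth in uniqueListOfCodesInColumns[3]:
--                         for fith in uniqueListOfCodesInColumns[4]:
--                             for sixth in uniqueListOfCodesInColumns[5]:
--                                 allCombos.append(first + '^' + second + '^' + third + '^' +\
--                                           forth + '^' + fith + '^' + sixth)
--     return allCombos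
-- ===== SOURCE B (Python) =====
-- def FindAllCombinations(uniqueListOfCodesInColumns):
--     '''
--     finds and returns all possible combinations
--     each combination is a string, separated by a '^'
--     '''
--     if not uniqueListOfCodesInColumns:
--         return []
--     running = list(uniqueListOfCodesInColumns[0])
--     for col in uniqueListOfCodesInColumns[1:]:
--         running = [prefix + '^' + code for prefix in running for code in col]
--     return running
-- ===== Notes on version B (the rewrite author's own statement) =====
-- stated objective: simpler
-- what changed: Replaces the four hand-unrolled nested-loop blocks (one per supported arity 3-6) with a single fold that extends every partial combination with '^'+code column by column, handling any arity uniformly.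
import Mathlib
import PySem

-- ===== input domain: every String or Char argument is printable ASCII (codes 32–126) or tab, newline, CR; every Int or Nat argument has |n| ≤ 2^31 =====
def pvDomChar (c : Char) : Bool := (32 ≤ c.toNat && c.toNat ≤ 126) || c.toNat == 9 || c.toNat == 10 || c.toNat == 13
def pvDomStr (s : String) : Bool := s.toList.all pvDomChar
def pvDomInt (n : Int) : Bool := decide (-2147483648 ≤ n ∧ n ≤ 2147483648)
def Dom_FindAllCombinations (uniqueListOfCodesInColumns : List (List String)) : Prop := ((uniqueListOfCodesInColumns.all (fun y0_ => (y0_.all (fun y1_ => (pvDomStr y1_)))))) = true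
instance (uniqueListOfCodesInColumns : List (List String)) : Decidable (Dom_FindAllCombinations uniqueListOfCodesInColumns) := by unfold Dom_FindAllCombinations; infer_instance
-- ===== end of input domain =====

-- B replaces A's four hand-unrolled nested-loop blocks (arity 3..6) by one uniform fold
-- extending each partial combination column by column: simpler, same cost (return value only).

-- ===== PORT A =====
-- A's hand-unrolled nested for-loops, one block per supported length; the final 'else []'
-- branch corresponds to Python's UnboundLocalError and is excluded by Pre_.
def FindAllCombinations (uniqueListOfCodesInColumns : List (List String)) : List String :=
  if uniqueListOfCodesInColumns.length == 3 then
    (uniqueListOfCodesInColumns.getD 0 []).foldl (fun a1 first =>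
      (uniqueListOfCodesInColumns.getD 1 []).foldl (fun a2 second =>
        (uniqueListOfCodesInColumns.getD 2 []).foldl (fun a3 third =>
          a3 ++ [first ++ "^" ++ second ++ "^" ++ third]) a2) a1) []
  else if uniqueListOfCodesInColumns.length == 4 then
    (uniqueListOfCodesInColumns.getD 0 []).foldl (fun a1 first =>
      (uniqueListOfCodesInColumns.getD 1 []).foldl (fun a2 second =>
        (uniqueListOfCodesInColumns.getD 2 []).foldl (fun a3 third =>
          (uniqueListOfCodesInColumns.getD 3 []).foldl (fun a4 forth =>
            a4 ++ [first ++ "^" ++ second ++ "^" ++ third ++ "^" ++ forth]) a3) a2) a1) []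
  else if uniqueListOfCodesInColumns.length == 5 then
    (uniqueListOfCodesInColumns.getD 0 []).foldl (fun a1 first =>
      (uniqueListOfCodesInColumns.getD 1 []).foldl (fun a2 second =>
        (uniqueListOfCodesInColumns.getD 2 []).foldl (fun a3 third =>
          (uniqueListOfCodesInColumns.getD 3 []).foldl (fun a4 forth =>
            (uniqueListOfCodesInColumns.getD 4 []).foldl (fun a5 fith =>
              a5 ++ [first ++ "^" ++ second ++ "^" ++ third ++ "^" ++ forth ++ "^" ++ fith]) a4) a3) a2) a1) []
  else if uniqueListOfCodesInColumns.length == 6 then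
    (uniqueListOfCodesInColumns.getD 0 []).foldl (fun a1 first =>
      (uniqueListOfCodesInColumns.getD 1 []).foldl (fun a2 second =>
        (uniqueListOfCodesInColumns.getD 2 []).foldl (fun a3 third =>
          (uniqueListOfCodesInColumns.getD 3 []).foldl (fun a4 forth =>
            (uniqueListOfCodesInColumns.getD 4 []).foldl (fun a5 fith =>
              (uniqueListOfCodesInColumns.getD 5 []).foldl (fun a6 sixth =>
                a6 ++ [first ++ "^" ++ second ++ "^" ++ third ++ "^" ++ forth ++ "^" ++ fith ++ "^" ++ sixth]) a5) a4) a3) a2) a1) []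
  else []

-- ===== PORT B =====
def FindAllCombinations_alt (uniqueListOfCodesInColumns : List (List String)) : List String :=
  match uniqueListOfCodesInColumns with
  | [] => []
  | c0 :: rest =>
    rest.foldl (fun running col =>
      running.flatMap (fun prefixStr => col.map (fun code => prefixStr ++ "^" ++ code))) c0

-- ===== PRECONDITION & SPEC =====
-- Pre_ excludes exactly the lengths (≠ 3,4,5,6) on which Python A raises UnboundLocalError.
def Pre_FindAllCombinations (uniqueListOfCodesInColumns : List (List String)) : Prop :=
  uniqueListOfCodesInColumns.length = 3 ∨ uniqueListOfCodesInColumns.length = 4 ∨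
  uniqueListOfCodesInColumns.length = 5 ∨ uniqueListOfCodesInColumns.length = 6
instance (uniqueListOfCodesInColumns : List (List String)) : Decidable (Pre_FindAllCombinations uniqueListOfCodesInColumns) := by unfold Pre_FindAllCombinations; infer_instance
def pvWitness_FindAllCombinations : List (List String) := [["a", "b"], ["c"], ["d", "e"]]

def Spec_FindAllCombinations (uniqueListOfCodesInColumns : List (List String)) (out : List String) : Prop := out = FindAllCombinations_alt uniqueListOfCodesInColumns
instance (uniqueListOfCodesInColumns : List (List String)) (out : List String) : Decidable (Spec_FindAllCombinations uniqueListOfCodesInColumns out) := by unfold Spec_FindAllCombinations; infer_instance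

-- ===== CLAIM (what is proved, stated in full; the proofs are below) =====
def Claim_equal_FindAllCombinations : Prop := ∀ (uniqueListOfCodesInColumns : List (List String)), Dom_FindAllCombinations uniqueListOfCodesInColumns → Pre_FindAllCombinations uniqueListOfCodesInColumns → Spec_FindAllCombinations uniqueListOfCodesInColumns (FindAllCombinations uniqueListOfCodesInColumns)

-- ===== LEMMAS AND PROOFS =====

theorem pv_arity_eq (uniqueListOfCodesInColumns : List (List String))
    (h : Pre_FindAllCombinations uniqueListOfCodesInColumns) :
    FindAllCombinations uniqueListOfCodesInColumns = FindAllCombinations_alt uniqueListOfCodesInColumns := by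
  unfold Pre_FindAllCombinations at h
  match uniqueListOfCodesInColumns, h with
  | [a, b, c], _ =>
    simp only [FindAllCombinations, FindAllCombinations_alt, List.foldl_cons, List.foldl_nil,
      List.length_cons, List.length_nil, Nat.reduceAdd, beq_self_eq_true, if_true, reduceIte,
      PySem.List.foldl_append_singleton_eq_map, PySem.List.foldl_append_eq_flatMap,
      List.flatMap_assoc, List.flatMap_map, Function.comp_def, List.nil_append]
    rfl
  | [a, b, c, d], _ =>
    simp only [FindAllCombinations, FindAllCombinations_alt, List.foldl_cons, List.foldl_nil,
      List.length_cons, List.length_nil, Nat.reduceAdd, beq_self_eq_true, if_true, reduceIte,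
      PySem.List.foldl_append_singleton_eq_map, PySem.List.foldl_append_eq_flatMap,
      List.flatMap_assoc, List.flatMap_map, Function.comp_def, List.nil_append]
    rfl
  | [a, b, c, d, e], _ =>
    simp only [FindAllCombinations, FindAllCombinations_alt, List.foldl_cons, List.foldl_nil,
      List.length_cons, List.length_nil, Nat.reduceAdd, beq_self_eq_true, if_true, reduceIte,
      PySem.List.foldl_append_singleton_eq_map, PySem.List.foldl_append_eq_flatMap,
      List.flatMap_assoc, List.flatMap_map, Function.comp_def, List.nil_append]
    rfl
  | [a, b, c, d, e, f], _ =>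
    simp only [FindAllCombinations, FindAllCombinations_alt, List.foldl_cons, List.foldl_nil,
      List.length_cons, List.length_nil, Nat.reduceAdd, beq_self_eq_true, if_true, reduceIte,
      PySem.List.foldl_append_singleton_eq_map, PySem.List.foldl_append_eq_flatMap,
      List.flatMap_assoc, List.flatMap_map, Function.comp_def, List.nil_append]
    rfl

-- ===== VERDICT (by name: the statement is the Claim_ definition above) =====
theorem FindAllCombinations_spec : Claim_equal_FindAllCombinations := by
  intro l _ hPre
  unfold Spec_FindAllCombinations
  exact pv_arity_eq l hPre
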